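-- pv_equiv track=rewrite | github.com/moink/AoC2017 | day24/day24.py | score_part_1
-- ===== SOURCE A (Python) =====
-- def score_part_1(cur_port, ports):
--     poss_scores = [0]
--     for consider in ports:
--         if cur_port in consider:
--             try:
--                 other_side = [pins for pins in consider if pins != cur_port][0]
--             except IndexError:
--                 other_side = cur_port
--             ports_left = [port for port in ports if port!=consider]
--             poss_scores.append(cur_port + other_side
--                                + score_part_1(other_side, ports_left))
--     return max(poss_scores)
-- ===== SOURCE B (Python) =====
-- def score_part_1(cur_port, ports):
--     # Memoized recursion on (current port, tuple of remaining ports).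
--     memo = {}
--
--     def solve(cur, rem):
--         key = (cur, rem)
--         if key in memo:
--             return memo[key]
--         best = 0
--         for a, b in rem:
--             if a == cur or b == cur:
--                 other = b if a == cur else a
--                 rest = tuple(q for q in rem if q != (a, b))
--                 best = max(best, cur + other + solve(other, rest))
--         memo[key] = best
--         return best
--
--     return solve(cur_port, tuple(ports))
-- ===== Notes on version B (the rewrite author's own statement) =====
-- stated objective: faster
-- what changed: B replaces A's exhaustive re-enumeration of every bridge ordering (rebuilding candidate lists and re-solving identical subproblems) with a memoized recursion keyed by (current port, tuple of remaining ports), so each reachable state is solved once; the inner list-building/try-except other-side computation is also replaced by direct arithmetic and a running max.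
import Mathlib
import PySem

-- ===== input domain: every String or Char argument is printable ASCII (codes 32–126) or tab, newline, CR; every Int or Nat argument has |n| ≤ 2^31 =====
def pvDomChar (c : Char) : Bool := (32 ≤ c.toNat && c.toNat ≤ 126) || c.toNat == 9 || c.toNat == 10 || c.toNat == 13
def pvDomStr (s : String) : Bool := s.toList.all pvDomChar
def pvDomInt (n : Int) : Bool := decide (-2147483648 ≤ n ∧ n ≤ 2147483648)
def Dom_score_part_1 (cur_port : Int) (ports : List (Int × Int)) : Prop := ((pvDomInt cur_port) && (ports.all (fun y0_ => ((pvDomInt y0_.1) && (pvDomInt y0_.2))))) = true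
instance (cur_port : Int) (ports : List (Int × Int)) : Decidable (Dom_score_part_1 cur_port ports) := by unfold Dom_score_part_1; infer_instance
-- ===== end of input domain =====

-- B replaces A's exponential re-enumeration with a memoized recursion on (current port, remaining ports),
-- reusing each solved state instead of recomputing it; proved to return A's exact value on every input.

-- ===== PORT A =====
-- helper lemma cited by the termination proofs of both ports
lemma pvFilterNeLt (c : Int × Int) (l : List (Int × Int)) (h : c ∈ l) :
    (l.filter (fun p => decide (p ≠ c))).length < l.length := by
  rw [List.length_filter_lt_length_iff_exists]
  exact ⟨c, h, by simp⟩

mutual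
def score_part_1 (cur_port : Int) (ports : List (Int × Int)) : Int :=
  (PySem.List.max? (scoreLoopA cur_port ports ports (fun _ hx => hx) [0]) (fun y => y)).getD 0
termination_by (ports.length, ports.length + 2)
decreasing_by
  exact Prod.Lex.right _ (Nat.lt_succ_self _)

def scoreLoopA (cur : Int) (ports : List (Int × Int)) (items : List (Int × Int))
    (h : ∀ x ∈ items, x ∈ ports) (acc : List Int) : List Int :=
  match items with
  | [] => acc
  | consider :: rest =>
    if cur = consider.1 ∨ cur = consider.2 then
      let candidates := ((if consider.1 ≠ cur then [consider.1] else []) ++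
                         (if consider.2 ≠ cur then [consider.2] else []))
      let other := (PySem.List.pyGet? candidates 0).getD cur
      let ports_left := ports.filter (fun p => decide (p ≠ consider))
      scoreLoopA cur ports rest (fun x hx => h x (List.mem_cons_of_mem _ hx))
        (acc ++ [cur + other + score_part_1 other ports_left])
    else
      scoreLoopA cur ports rest (fun x hx => h x (List.mem_cons_of_mem _ hx)) acc
termination_by (ports.length, items.length + 1)
decreasing_by
  · exact Prod.Lex.left _ _ (Nat.lt_of_lt_of_le (pvFilterNeLt consider ports (h consider (List.mem_cons_self))) (by omega))
  · exact Prod.Lex.right _ (by simp)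
  · exact Prod.Lex.right _ (by simp)
end

-- ===== PORT B =====
-- solveB/solveLoopB are B's memoized recursion (memo threaded explicitly)
mutual
def solveB (cur : Int) (rem : List (Int × Int)) (memo : PySem.Dict (Int × List (Int × Int)) Int) :
    Int × PySem.Dict (Int × List (Int × Int)) Int :=
  match PySem.Dict.get? memo (cur, rem) with
  | some v => (v, memo)
  | none =>
    let r := solveLoopB cur rem rem (fun _ hx => hx) 0 memo
    (r.1, PySem.Dict.insert r.2 (cur, rem) r.1)
termination_by (rem.length, rem.length + 2)
decreasing_by
  exact Prod.Lex.right _ (Nat.lt_succ_self _)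

def solveLoopB (cur : Int) (rem : List (Int × Int)) (items : List (Int × Int))
    (h : ∀ x ∈ items, x ∈ rem) (best : Int) (memo : PySem.Dict (Int × List (Int × Int)) Int) :
    Int × PySem.Dict (Int × List (Int × Int)) Int :=
  match items with
  | [] => (best, memo)
  | (a, b) :: rest =>
    if a = cur ∨ b = cur then
      let other := if a = cur then b else a
      let rst := rem.filter (fun q => decide (q ≠ (a, b)))
      let s := solveB other rst memo
      solveLoopB cur rem rest (fun x hx => h x (List.mem_cons_of_mem _ hx))
        (max best (cur + other + s.1)) s.2
    else
      solveLoopB cur rem rest (fun x hx => h x (List.mem_cons_of_mem _ hx)) best memo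
termination_by (rem.length, items.length + 1)
decreasing_by
  · exact Prod.Lex.left _ _ (Nat.lt_of_lt_of_le (pvFilterNeLt (a, b) rem (h (a, b) (List.mem_cons_self))) (by omega))
  · exact Prod.Lex.right _ (by simp)
  · exact Prod.Lex.right _ (by simp)
end

def score_part_1_alt (cur_port : Int) (ports : List (Int × Int)) : Int :=
  (solveB cur_port ports PySem.Dict.empty).1

-- ===== PRECONDITION & SPEC =====
def Spec_score_part_1 (cur_port : Int) (ports : List (Int × Int)) (out : Int) : Prop := out = score_part_1_alt cur_port ports
instance (cur_port : Int) (ports : List (Int × Int)) (out : Int) : Decidable (Spec_score_part_1 cur_port ports out) := by unfold Spec_score_part_1; infer_instance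

-- ===== CLAIM (what is proved, stated in full; the proofs are below) =====
def Claim_equal_score_part_1 : Prop := ∀ (cur_port : Int) (ports : List (Int × Int)), Dom_score_part_1 cur_port ports → Spec_score_part_1 cur_port ports (score_part_1 cur_port ports)

-- ===== LEMMAS AND PROOFS =====
def pvOther (cur : Int) (c : Int × Int) : Int := if c.1 = cur then c.2 else c.1

def pvVals (cur : Int) (ports : List (Int × Int)) (items : List (Int × Int)) : List Int :=
  (items.filter (fun c => decide (c.1 = cur ∨ c.2 = cur))).map
    (fun c => cur + pvOther cur c + score_part_1 (pvOther cur c) (ports.filter (fun p => decide (p ≠ c))))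

def pvValid (memo : PySem.Dict (Int × List (Int × Int)) Int) : Prop :=
  ∀ c r v, PySem.Dict.get? memo (c, r) = some v → v = score_part_1 c r

lemma scoreLoopA_eq (cur : Int) (ports : List (Int × Int)) :
    ∀ (items : List (Int × Int)) (h : ∀ x ∈ items, x ∈ ports) (acc : List Int),
      scoreLoopA cur ports items h acc = acc ++ pvVals cur ports items := by
  intro items
  induction items with
  | nil => intro h acc; simp [scoreLoopA, pvVals]
  | cons c rest ih =>
    intro h acc
    rw [scoreLoopA]
    by_cases hg : cur = c.1 ∨ cur = c.2
    · rw [if_pos hg, ih]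
      by_cases h1 : c.1 = cur <;> by_cases h2 : c.2 = cur
      · simp [pvVals, pvOther, h1, h2, PySem.List.pyGet?, PySem.List.pyIdx?]
      · simp [pvVals, pvOther, h1, h2, PySem.List.pyGet?, PySem.List.pyIdx?]
      · simp [pvVals, pvOther, h1, h2, PySem.List.pyGet?, PySem.List.pyIdx?]
      · exact absurd hg (by simp; constructor <;> omega)
    · rw [if_neg hg, ih]
      have hcond : ¬(c.1 = cur ∨ c.2 = cur) := by
        intro hc; exact hg (by rcases hc with hc | hc <;> [left; right] <;> omega)
      simp [pvVals, hcond]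

lemma score_part_1_eq_foldl (cur : Int) (ports : List (Int × Int)) :
    score_part_1 cur ports = List.foldl max 0 (pvVals cur ports ports) := by
  rw [score_part_1, scoreLoopA_eq]
  simp [PySem.List.max?_id_cons]

lemma solveLoopB_spec (cur : Int) (rem : List (Int × Int))
    (IH : ∀ cur' r' memo', r'.length < rem.length → pvValid memo' →
      (solveB cur' r' memo').1 = score_part_1 cur' r' ∧ pvValid (solveB cur' r' memo').2) :
    ∀ (items : List (Int × Int)) (h : ∀ x ∈ items, x ∈ rem) (best : Int) memo,
      pvValid memo →
      (solveLoopB cur rem items h best memo).1 = List.foldl max best (pvVals cur rem items) ∧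
      pvValid (solveLoopB cur rem items h best memo).2 := by
  intro items
  induction items with
  | nil => intro h best memo hv; simp [solveLoopB, pvVals]; exact hv
  | cons c rest ih =>
    intro h best memo hv
    obtain ⟨a, b⟩ := c
    rw [solveLoopB]
    by_cases hg : a = cur ∨ b = cur
    · rw [if_pos hg]
      have hmem : (a, b) ∈ rem := h (a, b) List.mem_cons_self
      have hlt : (rem.filter (fun q => decide (q ≠ (a, b)))).length < rem.length :=
        pvFilterNeLt (a, b) rem hmem
      obtain ⟨hs1, hs2⟩ := IH (if a = cur then b else a)
        (rem.filter (fun q => decide (q ≠ (a, b)))) memo hlt hv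
      obtain ⟨h1, h2⟩ := ih (fun x hx => h x (List.mem_cons_of_mem _ hx))
        (max best (cur + (if a = cur then b else a) +
          (solveB (if a = cur then b else a) (rem.filter (fun q => decide (q ≠ (a, b)))) memo).1))
        (solveB (if a = cur then b else a) (rem.filter (fun q => decide (q ≠ (a, b)))) memo).2 hs2
      refine ⟨?_, h2⟩
      rw [h1]
      simp only [ne_eq, decide_not] at hs1
      simp [pvVals, pvOther, hg, hs1]
    · rw [if_neg hg]
      have := ih (fun x hx => h x (List.mem_cons_of_mem _ hx)) best memo hv
      simpa [pvVals, List.filter_cons, hg] using this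

lemma pvStep (rem : List (Int × Int))
    (IH : ∀ cur' r' memo', r'.length < rem.length → pvValid memo' →
      (solveB cur' r' memo').1 = score_part_1 cur' r' ∧ pvValid (solveB cur' r' memo').2) :
    ∀ (cur : Int) memo, pvValid memo →
      (solveB cur rem memo).1 = score_part_1 cur rem ∧ pvValid (solveB cur rem memo).2 := by
  intro cur memo hv
  rw [solveB]
  cases hm : PySem.Dict.get? memo (cur, rem) with
  | some v =>
    exact ⟨hv cur rem v hm, hv⟩
  | none =>
    obtain ⟨h1, h2⟩ := solveLoopB_spec cur rem IH rem (fun _ hx => hx) 0 memo hv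
    constructor
    · rw [h1, score_part_1_eq_foldl]
    · intro c r' v hg
      rw [PySem.Dict.get?_insert] at hg
      by_cases hk : ((c, r') : Int × List (Int × Int)) = (cur, rem)
      · rw [if_pos hk] at hg
        obtain ⟨rfl, rfl⟩ := Prod.mk.injEq .. ▸ hk
        rw [← Option.some_inj.mp hg, h1, score_part_1_eq_foldl]
      · rw [if_neg hk] at hg
        exact h2 c r' v hg

lemma solveB_spec : ∀ (n : Nat) (rem : List (Int × Int)), rem.length ≤ n →
    ∀ (cur : Int) memo, pvValid memo →
      (solveB cur rem memo).1 = score_part_1 cur rem ∧ pvValid (solveB cur rem memo).2 := by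
  intro n
  induction n with
  | zero =>
    intro rem hlen cur memo hv
    exact pvStep rem (fun cur' r' memo' hlt _ => absurd hlt (by omega)) cur memo hv
  | succ k ihn =>
    intro rem hlen cur memo hv
    exact pvStep rem (fun cur' r' memo' hlt hv' => ihn r' (by omega) cur' memo' hv') cur memo hv

lemma pvValid_empty : pvValid PySem.Dict.empty := by
  intro c r v h
  rw [PySem.Dict.get?_empty] at h
  cases h

-- ===== VERDICT (by name: the statement is the Claim_ definition above) =====
theorem score_part_1_spec : Claim_equal_score_part_1 := by
  intro cur_port ports _
  unfold Spec_score_part_1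
  rw [score_part_1_alt]
  exact (solveB_spec ports.length ports le_rfl cur_port PySem.Dict.empty pvValid_empty).1.symm
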